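-- pv_equiv track=rewrite | github.com/catalinc/advent-of-code-2017 | day_14.py | nibble
-- ===== SOURCE A (Python) =====
-- def nibble(n):
--     bits, i = [], 0
--     while i < 4:
--         if n & 0x1:
--             bits.insert(0, 1)
--         else:
--             bits.insert(0, 0)
--         n >>= 1
--         i += 1
--     return bits
-- ===== SOURCE B (Python) =====
-- def nibble(n):
--     m = n & 0xF
--     return [m >> 3 & 1, m >> 2 & 1, m >> 1 & 1, m & 1]
-- ===== Notes on version B (the rewrite author's own statement) =====
-- stated objective: simpler
-- what changed: Replaced the while-loop that repeatedly shifts n and inserts bits at the front by a single mask m = n & 0xF and a branchless closed-form list of the four bits [m>>3&1, m>>2&1, m>>1&1, m&1].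
import Mathlib
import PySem

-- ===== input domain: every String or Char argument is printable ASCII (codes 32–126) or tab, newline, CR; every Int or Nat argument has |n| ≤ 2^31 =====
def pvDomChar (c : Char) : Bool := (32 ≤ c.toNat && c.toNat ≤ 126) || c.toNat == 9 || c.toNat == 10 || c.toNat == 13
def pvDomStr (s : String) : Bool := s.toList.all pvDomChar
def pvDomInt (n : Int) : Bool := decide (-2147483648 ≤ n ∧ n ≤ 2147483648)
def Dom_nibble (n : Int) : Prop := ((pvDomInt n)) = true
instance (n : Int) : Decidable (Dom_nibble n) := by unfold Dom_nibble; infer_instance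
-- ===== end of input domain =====

-- B replaces A's 4-step shift loop with prepend by a closed-form list of the four bits of n & 0xF (simpler).

-- ===== PORT A =====
-- while i < 4: test n & 1, prepend the bit, n >>= 1  (n & 1 = n mod 2, n >> 1 = n // 2)
def nibble (n : Int) : List Int :=
  ((List.range 4).foldl
    (fun (st : List Int × Int) _ =>
      let bits := if PySem.Int.mod st.2 2 ≠ 0 then 1 :: st.1 else 0 :: st.1
      (bits, PySem.Int.floordiv st.2 2))
    ([], n)).1

-- ===== PORT B =====
-- m = n & 0xF (= n mod 16); m >> k = m // 2^k, & 1 = mod 2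
def nibble_alt (n : Int) : List Int :=
  let m := PySem.Int.mod n 16
  [PySem.Int.mod (PySem.Int.floordiv m 8) 2,
   PySem.Int.mod (PySem.Int.floordiv m 4) 2,
   PySem.Int.mod (PySem.Int.floordiv m 2) 2,
   PySem.Int.mod m 2]

-- ===== PRECONDITION & SPEC =====
def Spec_nibble (n : Int) (out : List Int) : Prop := out = nibble_alt n
instance (n : Int) (out : List Int) : Decidable (Spec_nibble n out) := by unfold Spec_nibble; infer_instance

-- ===== CLAIM (what is proved, stated in full; the proofs are below) =====
def Claim_equal_nibble : Prop := ∀ (n : Int), Dom_nibble n → Spec_nibble n (nibble n)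

-- ===== LEMMAS AND PROOFS =====

theorem nibble_eq (n : Int) : nibble n = nibble_alt n := by
  simp only [nibble, nibble_alt, List.range_succ, List.range_zero, List.foldl,
    List.nil_append, List.cons_append,
    PySem.Int.mod_eq_emod_of_pos (by norm_num : (0:Int) < 2),
    PySem.Int.mod_eq_emod_of_pos (by norm_num : (0:Int) < 16),
    PySem.Int.floordiv_eq_ediv_of_pos (by norm_num : (0:Int) < 2),
    PySem.Int.floordiv_eq_ediv_of_pos (by norm_num : (0:Int) < 4),
    PySem.Int.floordiv_eq_ediv_of_pos (by norm_num : (0:Int) < 8)]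
  split_ifs <;> simp_all <;> omega

-- ===== VERDICT (by name: the statement is the Claim_ definition above) =====
theorem nibble_spec : Claim_equal_nibble := by
  intro n _
  exact nibble_eq n
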